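-- pv_equiv track=rewrite | github.com/Mrgm-ay/tools | Get_Struct_Value.py | parse_init_values
-- ===== SOURCE A (Python) =====
-- from typing import List, Dict, Tuple, Optional
--
-- def parse_init_values(init_str: str, members: List[Dict]) -> Dict[str, str]:
--     """初期化値を解析してメンバごとの値を抽出"""
--     member_values = {}
--
--     # 初期化文字列から { } を除去し、内容を取得
--     init_str = init_str.strip()
--     if init_str.startswith('{') and init_str.endswith('}'):
--         init_str = init_str[1:-1].strip()
--
--     # カンマで分割（ネストした構造体は考慮しない簡易版）
--     values = []
--     bracket_count = 0
--     current_value = ""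
--
--     for char in init_str:
--         if char == '{':
--             bracket_count += 1
--         elif char == '}':
--             bracket_count -= 1
--         elif char == ',' and bracket_count == 0:
--             values.append(current_value.strip())
--             current_value = ""
--             continue
--         current_value += char
--
--     if current_value.strip():
--         values.append(current_value.strip())
--
--     # メンバ名と値を対応付け
--     for i, member in enumerate(members):
--         if i < len(values):
--             member_values[member['member_name']] = values[i]
--         else:
--             member_values[member['member_name']] = ""
--
--     return member_values
-- ===== SOURCE B (Python) =====
-- def parse_init_values(init_str, members):
--     s = init_str.strip()
--     if s.startswith('{') and s.endswith('}'):
--         s = s[1:-1].strip()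
--     # pass 1: positions of top-level commas
--     cuts = [-1]
--     depth = 0
--     for i, ch in enumerate(s):
--         if ch == '{':
--             depth += 1
--         elif ch == '}':
--             depth -= 1
--         elif ch == ',' and depth == 0:
--             cuts.append(i)
--     cuts.append(len(s))
--     # pass 2: slice between consecutive cut points
--     parts = [s[cuts[j] + 1:cuts[j + 1]] for j in range(len(cuts) - 1)]
--     values = [p.strip() for p in parts[:-1]]
--     last = parts[-1].strip()
--     if last:
--         values.append(last)
--     return {m['member_name']: (values[i] if i < len(values) else "")
--             for i, m in enumerate(members)}
-- ===== Notes on version B (the rewrite author's own statement) =====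
-- stated objective: alternative
-- what changed: A accumulates the current segment character by character and appends it at each top-level comma; B instead makes two passes: first collect the indices of the top-level commas, then slice the string between consecutive cut points, keeping every stripped intermediate segment but the final one only when non-empty.
import Mathlib
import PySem

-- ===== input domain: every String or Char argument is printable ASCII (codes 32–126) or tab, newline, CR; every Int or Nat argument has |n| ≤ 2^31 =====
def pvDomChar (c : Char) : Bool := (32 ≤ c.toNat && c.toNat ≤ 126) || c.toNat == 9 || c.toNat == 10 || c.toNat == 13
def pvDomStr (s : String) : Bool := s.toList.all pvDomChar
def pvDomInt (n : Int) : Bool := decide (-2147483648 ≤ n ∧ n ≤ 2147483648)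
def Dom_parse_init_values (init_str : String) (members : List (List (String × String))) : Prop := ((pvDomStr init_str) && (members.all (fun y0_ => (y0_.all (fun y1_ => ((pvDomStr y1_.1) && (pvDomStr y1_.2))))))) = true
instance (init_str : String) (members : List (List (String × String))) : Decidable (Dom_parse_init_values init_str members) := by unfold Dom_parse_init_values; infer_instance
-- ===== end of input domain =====

-- B replaces A's character-accumulator split with a two-pass scheme (collect top-level comma
-- positions, then slice between them); objective: alternative decomposition, same cost.

-- ===== PORT A =====
-- the for-loop over init_str's characters, state (values, bracket_count, current_value)
def pvALoop : List Char → List (List Char) → Int → List Char → List (List Char)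
  | [], vals, _, cur =>
      if PySem.Chars.strip cur ≠ [] then vals ++ [PySem.Chars.strip cur] else vals
  | c :: rest, vals, bc, cur =>
      if c = '{' then pvALoop rest vals (bc + 1) (cur ++ [c])
      else if c = '}' then pvALoop rest vals (bc - 1) (cur ++ [c])
      else if c = ',' ∧ bc = 0 then pvALoop rest (vals ++ [PySem.Chars.strip cur]) bc []
      else pvALoop rest vals bc (cur ++ [c])

def parse_init_values (init_str : String) (members : List (List (String × String))) : List (String × String) :=
  let s0 := PySem.Str.strip init_str
  let content : List Char :=
    if PySem.Str.startswith s0 "{" && PySem.Str.endswith s0 "}" then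
      PySem.Chars.strip (PySem.List.slice s0.toList (some 1) (some (-1)))
    else s0.toList
  let values : List (List Char) := pvALoop content [] 0 []
  ((PySem.List.enumerate members).foldl
    (fun (d : PySem.Dict String String) im =>
      d.insert ((PySem.Dict.mk im.2).getD "member_name" "")
        (if im.1 < (values.length : Int) then String.ofList (PySem.List.pyGetD values im.1 []) else ""))
    PySem.Dict.empty).items

-- ===== PORT B =====
-- pass 1: positions of the top-level commas, state (cuts, depth)
def pvBCuts (content : List Char) : List Int :=
  ((PySem.List.enumerate content).foldl
    (fun (st : List Int × Int) ic =>
      if ic.2 = '{' then (st.1, st.2 + 1)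
      else if ic.2 = '}' then (st.1, st.2 - 1)
      else if ic.2 = ',' ∧ st.2 = 0 then (st.1 ++ [ic.1], st.2)
      else st)
    ([-1], 0)).1

-- pass 2: slice between consecutive cut points; keep every stripped segment but the last,
-- the last only when non-empty after strip
def pvBValues (content : List Char) : List (List Char) :=
  let cuts : List Int := pvBCuts content ++ [(content.length : Int)]
  let parts : List (List Char) :=
    (PySem.List.pyRange 0 ((cuts.length : Int) - 1) 1).map
      (fun j => PySem.List.slice content (some (PySem.List.pyGetD cuts j 0 + 1))
                                         (some (PySem.List.pyGetD cuts (j + 1) 0)))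
  let values0 := (PySem.List.slice parts none (some (-1))).map PySem.Chars.strip
  let lastp := PySem.Chars.strip (PySem.List.pyGetD parts (-1) [])
  if lastp ≠ [] then values0 ++ [lastp] else values0

def parse_init_values_alt (init_str : String) (members : List (List (String × String))) : List (String × String) :=
  let s0 := PySem.Str.strip init_str
  let content : List Char :=
    if PySem.Str.startswith s0 "{" && PySem.Str.endswith s0 "}" then
      PySem.Chars.strip (PySem.List.slice s0.toList (some 1) (some (-1)))
    else s0.toList
  let values : List (List Char) := pvBValues content
  ((PySem.List.enumerate members).foldl
    (fun (d : PySem.Dict String String) im =>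
      d.insert ((PySem.Dict.mk im.2).getD "member_name" "")
        (if im.1 < (values.length : Int) then String.ofList (PySem.List.pyGetD values im.1 []) else ""))
    PySem.Dict.empty).items

-- ===== PRECONDITION & SPEC =====
-- Pre_ excludes exactly the members lists with a dict lacking the key 'member_name', on which A raises KeyError
def Pre_parse_init_values (init_str : String) (members : List (List (String × String))) : Prop :=
  ∀ m ∈ members, (PySem.Dict.mk m).contains "member_name" = true
instance (init_str : String) (members : List (List (String × String))) : Decidable (Pre_parse_init_values init_str members) := by unfold Pre_parse_init_values; infer_instance

def pvWitness_parse_init_values : String × (List (List (String × String))) :=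
  ("{ 1, {2, 3} }", [[("member_name", "a")], [("member_name", "b")]])

def Spec_parse_init_values (init_str : String) (members : List (List (String × String))) (out : List (String × String)) : Prop := out = parse_init_values_alt init_str members
instance (init_str : String) (members : List (List (String × String))) (out : List (String × String)) : Decidable (Spec_parse_init_values init_str members out) := by unfold Spec_parse_init_values; infer_instance

-- ===== CLAIM (what is proved, stated in full; the proofs are below) =====
def Claim_equal_parse_init_values : Prop := ∀ (init_str : String) (members : List (List (String × String))), Dom_parse_init_values init_str members → Pre_parse_init_values init_str members → Spec_parse_init_values init_str members (parse_init_values init_str members)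

-- ===== LEMMAS AND PROOFS =====

-- reference splitter: the raw top-level segments of the scan
def pvSegs : List Char → Int → List Char → List (List Char)
  | [], _, cur => [cur]
  | c :: rest, bc, cur =>
      if c = '{' then pvSegs rest (bc + 1) (cur ++ [c])
      else if c = '}' then pvSegs rest (bc - 1) (cur ++ [c])
      else if c = ',' ∧ bc = 0 then cur :: pvSegs rest bc []
      else pvSegs rest bc (cur ++ [c])

-- top-level comma positions, recursively
def pvCuts : List Char → Int → Nat → List Nat
  | [], _, _ => []
  | c :: rest, bc, p =>
      if c = '{' then pvCuts rest (bc + 1) (p + 1)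
      else if c = '}' then pvCuts rest (bc - 1) (p + 1)
      else if c = ',' ∧ bc = 0 then p :: pvCuts rest bc (p + 1)
      else pvCuts rest bc (p + 1)

def pvFinalize (l : List (List Char)) : List (List Char) :=
  l.dropLast.map PySem.Chars.strip ++
    (if PySem.Chars.strip (l.getLast?.getD []) ≠ [] then [PySem.Chars.strip (l.getLast?.getD [])] else [])

theorem pvSegs_ne_nil (rest : List Char) (bc : Int) (cur : List Char) : pvSegs rest bc cur ≠ [] := by
  induction rest generalizing bc cur with
  | nil => simp [pvSegs]
  | cons c rest ih =>
    simp only [pvSegs]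
    split_ifs with h1 h2 h3
    · exact ih _ _
    · exact ih _ _
    · simp
    · exact ih _ _

theorem pvFinalize_cons (cur : List Char) (t : List (List Char)) (h : t ≠ []) :
    pvFinalize (cur :: t) = PySem.Chars.strip cur :: pvFinalize t := by
  obtain ⟨x, t', rfl⟩ := List.exists_cons_of_ne_nil h
  simp only [pvFinalize, List.dropLast_cons_of_ne_nil (List.cons_ne_nil x t'),
    List.getLast?_cons_cons, List.map_cons, List.cons_append]

theorem pvALoop_eq (rest : List Char) (vals : List (List Char)) (bc : Int) (cur : List Char) :
    pvALoop rest vals bc cur = vals ++ pvFinalize (pvSegs rest bc cur) := by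
  induction rest generalizing vals bc cur with
  | nil =>
    simp only [pvALoop, pvSegs, pvFinalize]
    split_ifs <;> simp_all
  | cons c rest ih =>
    simp only [pvALoop, pvSegs]
    split_ifs with h1 h2 h3
    · exact ih _ _ _
    · exact ih _ _ _
    · rw [ih, pvFinalize_cons _ _ (pvSegs_ne_nil _ _ _), List.append_assoc]
      rfl
    · exact ih _ _ _

theorem pvBCuts_eq (cs : List Char) (acc : List Int) (bc : Int) (p : Nat) :
    ((PySem.List.enumerate cs (p : Int)).foldl
      (fun (st : List Int × Int) ic =>
        if ic.2 = '{' then (st.1, st.2 + 1)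
        else if ic.2 = '}' then (st.1, st.2 - 1)
        else if ic.2 = ',' ∧ st.2 = 0 then (st.1 ++ [ic.1], st.2)
        else st)
      (acc, bc)).1 = acc ++ (pvCuts cs bc p).map (Nat.cast : Nat → Int) := by
  induction cs generalizing acc bc p with
  | nil => simp [PySem.List.enumerate, pvCuts]
  | cons c rest ih =>
    rw [PySem.List.enumerate_cons, List.foldl_cons]
    have hp1 : (p : Int) + 1 = ((p + 1 : Nat) : Int) := by push_cast; ring
    simp only [pvCuts]
    split_ifs with h1 h2 h3
    · rw [hp1]; exact ih _ _ _
    · rw [hp1]; exact ih _ _ _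
    · rw [hp1, ih]
      simp
    · rw [hp1]; exact ih _ _ _

def pvPairMap {β : Type} (f : Int → Int → β) : List Int → List β
  | a :: b :: t => f a b :: pvPairMap f (b :: t)
  | _ => []

theorem pvRangePairs {β : Type} (f : Int → Int → β) :
    ∀ (bs : List Int),
      (List.range (bs.length - 1)).map (fun k => f (bs.getD k 0) (bs.getD (k + 1) 0)) = pvPairMap f bs
  | [] => by simp [pvPairMap]
  | [a] => by simp [pvPairMap]
  | a :: b :: t => by
    have ih := pvRangePairs f (b :: t)
    simp only [List.length_cons, Nat.add_sub_cancel] at ih ⊢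
    rw [List.range_succ_eq_map, List.map_cons, List.map_map]
    simp only [pvPairMap, List.getD_cons_zero, List.getD_cons_succ, Function.comp_def,
      Nat.succ_eq_add_one]
    exact congrArg _ ih

def pvSliceParts (s : List Char) : List Int → Int → List (List Char)
  | [], a => [PySem.List.slice s (some (a + 1)) (some (s.length : Int))]
  | c :: t, a => PySem.List.slice s (some (a + 1)) (some c) :: pvSliceParts s t c

theorem pvPairMap_slices (s : List Char) (l : List Int) (a : Int) :
    pvPairMap (fun x y => PySem.List.slice s (some (x + 1)) (some y)) (a :: l ++ [(s.length : Int)]) =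
      pvSliceParts s l a := by
  induction l generalizing a with
  | nil => simp [pvPairMap, pvSliceParts]
  | cons c t ih =>
    simp only [List.cons_append, pvPairMap, pvSliceParts]
    exact congrArg _ (by simpa using ih c)

theorem pvTakeSnoc (s : List Char) (start p : Nat) (h1 : start ≤ p) (hlt : p < s.length) :
    (s.drop start).take (p + 1 - start) = (s.drop start).take (p - start) ++ [s[p]] := by
  have h2 : p + 1 - start = (p - start) + 1 := by omega
  rw [h2, List.take_add_one]
  have h3 : (s.drop start)[p - start]? = some s[p] := by
    rw [List.getElem?_drop]
    have h4 : start + (p - start) = p := by omega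
    rw [h4, List.getElem?_eq_getElem hlt]
  rw [h3]
  rfl

theorem pvMain (s : List Char) (rest : List Char) (bc : Int) (start p : Nat)
    (h1 : start ≤ p) (h2 : p ≤ s.length) (h3 : s.drop p = rest) :
    pvSliceParts s ((pvCuts rest bc p).map (Nat.cast : Nat → Int)) ((start : Int) - 1) =
      pvSegs rest bc ((s.drop start).take (p - start)) := by
  induction rest generalizing bc start p with
  | nil =>
    have hp : p = s.length := by
      have := List.drop_eq_nil_iff.mp h3
      omega
    subst hp
    have hmap : (pvCuts [] bc s.length).map (Nat.cast : Nat → Int) = [] := rfl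
    rw [hmap]
    simp only [pvSliceParts, pvSegs]
    have harith : (start : Int) - 1 + 1 = ((start : Nat) : Int) := by ring
    rw [harith, PySem.List.slice_natCast]
  | cons c rest ih =>
    have hlt : p < s.length := by
      by_contra hh
      push_neg at hh
      rw [List.drop_eq_nil_of_le hh] at h3
      simp at h3
    have hdec := List.drop_eq_getElem_cons hlt
    rw [h3] at hdec
    have hc : c = s[p] := (List.cons.injEq _ _ _ _ ▸ hdec).1
    have hrest : s.drop (p + 1) = rest := ((List.cons.injEq _ _ _ _ ▸ hdec).2).symm
    simp only [pvCuts, pvSegs]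
    split_ifs with hb1 hb2 hb3
    all_goals first
      | rw [ih _ _ _ (by omega) (by omega) hrest, pvTakeSnoc s start p h1 hlt, hc]
      | (simp only [List.map_cons, pvSliceParts]
         have harith : (start : Int) - 1 + 1 = ((start : Nat) : Int) := by ring
         rw [harith, PySem.List.slice_natCast]
         have htail := ih bc (p + 1) (p + 1) (by omega) (by omega) hrest
         have harith2 : ((p + 1 : Nat) : Int) - 1 = ((p : Nat) : Int) := by push_cast; ring
         rw [harith2] at htail
         rw [htail]
         simp)

-- ===== VERDICT (by name: the statement is the Claim_ definition above) =====
theorem pvRangePairs' {β : Type} (f : Int → Int → β) (bs : List Int) :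
    (PySem.List.pyRange 0 ((bs.length : Int) - 1) 1).map
      (fun j => f (PySem.List.pyGetD bs j 0) (PySem.List.pyGetD bs (j + 1) 0)) = pvPairMap f bs := by
  rw [PySem.List.pyRange_one, List.map_map, ← pvRangePairs f bs]
  have h1 : (((bs.length : Int) - 1 - 0)).toNat = bs.length - 1 := by omega
  rw [h1]
  apply List.map_congr_left
  intro k _
  simp only [Function.comp_def, zero_add]
  have h2 : ((k : Int) + 1) = (((k + 1 : Nat)) : Int) := by push_cast; ring
  rw [h2]
  simp only [PySem.List.pyGetD_natCast]

theorem pvBparts_eq (content : List Char) :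
    (PySem.List.pyRange 0 (((pvBCuts content ++ [(content.length : Int)]).length : Int) - 1) 1).map
      (fun j => PySem.List.slice content
          (some (PySem.List.pyGetD (pvBCuts content ++ [(content.length : Int)]) j 0 + 1))
          (some (PySem.List.pyGetD (pvBCuts content ++ [(content.length : Int)]) (j + 1) 0)))
      = pvSegs content 0 [] := by
  have hcuts : pvBCuts content = (-1) :: (pvCuts content 0 0).map (Nat.cast : Nat → Int) := by
    have h := pvBCuts_eq content [-1] 0 0
    simpa [pvBCuts] using h
  have key := pvMain content content 0 0 0 (by omega) (by omega) rfl
  simp only [Nat.cast_zero, zero_sub, Nat.sub_self, List.drop_zero, List.take_zero] at key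
  rw [hcuts]
  exact (pvRangePairs' (fun x y => PySem.List.slice content (some (x + 1)) (some y)) _).trans
    ((pvPairMap_slices content _ (-1)).trans key)

theorem pvFinalize_eq_b (P : List (List Char)) (h : P ≠ []) :
    (if PySem.Chars.strip (PySem.List.pyGetD P (-1) []) ≠ [] then
       (PySem.List.slice P none (some (-1))).map PySem.Chars.strip ++
         [PySem.Chars.strip (PySem.List.pyGetD P (-1) [])]
     else (PySem.List.slice P none (some (-1))).map PySem.Chars.strip) = pvFinalize P := by
  rw [PySem.List.slice_to_neg_one, PySem.List.pyGetD_neg_one P [] h, pvFinalize,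
    List.getLast?_eq_some_getLast h]
  simp only [Option.getD_some]
  split_ifs <;> simp

theorem pvBValues_eq (content : List Char) : pvBValues content = pvALoop content [] 0 [] := by
  simp only [pvBValues]
  rw [pvBparts_eq, pvFinalize_eq_b _ (pvSegs_ne_nil _ _ _), pvALoop_eq]
  simp only [List.nil_append]

set_option maxHeartbeats 1000000 in
theorem parse_init_values_spec : Claim_equal_parse_init_values := by
  intro init_str members _dom _pre
  unfold Spec_parse_init_values
  simp only [parse_init_values, parse_init_values_alt, pvBValues_eq]
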